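-- pv_equiv track=rewrite | github.com/hirosuzuki/procon | atcoder/abc167/abc167_d.py | solve
-- ===== SOURCE A (Python) =====
-- def solve(N, K, A):
--     result = 0
--     cs = [-1] * N
--     rs = []
--     i = 0
--     while i < K:
--         if cs[result] != -1:
--             l = i - cs[result]
--             m = (K - (i + (K - i) // l * l))
--             result = rs[-l + m]
--             break
--         cs[result] = i
--         rs.append(result)
--         result = A[result] - 1
--         i += 1
--
--     return result + 1
-- ===== SOURCE B (Python) =====
-- def solve(N, K, A):
--     # Binary lifting: up[j][v] = node reached from v after 2**j steps.
--     if K <= 0: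
--         return 1
--     LOG = 1
--     while (1 << LOG) <= K:
--         LOG += 1
--     up = [[A[v] - 1 for v in range(N)]]
--     for _ in range(1, LOG):
--         prev = up[-1]
--         up.append([prev[prev[v]] for v in range(N)])
--     cur = 0
--     for j in range(LOG):
--         if (K >> j) & 1:
--             cur = up[j][cur]
--     return cur + 1
-- ===== Notes on version B (the rewrite author's own statement) =====
-- stated objective: alternative
-- what changed: Replaces A's cycle detection (record visit times and the path, then index into the recorded cycle) by binary lifting: a doubling table up[j][v] of 2^j-step jumps over all N nodes, then the set bits of K select the jumps from node 0.
-- outside the precondition, e.g. on solve(2, 2, [1, 100]): A returns 1, B raises IndexError; on solve(1, 3, [0]): A returns 1, B returns 0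
import Mathlib
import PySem

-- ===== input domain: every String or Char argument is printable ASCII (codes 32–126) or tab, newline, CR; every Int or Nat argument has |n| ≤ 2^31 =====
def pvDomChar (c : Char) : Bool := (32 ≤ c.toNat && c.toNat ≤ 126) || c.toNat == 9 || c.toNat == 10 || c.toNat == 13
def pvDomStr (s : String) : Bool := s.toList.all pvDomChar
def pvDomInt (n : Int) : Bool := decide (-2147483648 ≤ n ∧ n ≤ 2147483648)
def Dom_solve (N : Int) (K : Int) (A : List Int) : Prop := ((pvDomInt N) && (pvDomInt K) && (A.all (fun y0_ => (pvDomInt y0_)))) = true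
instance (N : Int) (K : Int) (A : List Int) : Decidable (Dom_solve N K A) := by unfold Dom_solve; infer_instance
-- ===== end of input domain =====

-- B replaces A's cycle detection by binary lifting (a 2^j-jump table over all N nodes);
-- Pre_ restricts to the problem's natural domain (every successor entry in 1..N) plus all K ≤ 0.


-- ===== PORT A =====
-- while i < K: … ; fuel = (K - i).toNat, which is exactly the number of remaining iterations
def solveLoop (K : Int) (A : List Int) : Nat → Int → List Int → List Int → Int → Int
  | 0, result, _, _, _ => result
  | fuel + 1, result, cs, rs, i =>
    if i < K then
      if PySem.List.pyGetD cs result (-1) ≠ -1 then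
        let l := i - PySem.List.pyGetD cs result (-1)
        let m := K - (i + PySem.Int.floordiv (K - i) l * l)
        PySem.List.pyGetD rs (-l + m) 0
      else
        solveLoop K A fuel (PySem.List.pyGetD A result 0 - 1)
          (PySem.List.pySetD cs result i) (rs ++ [result]) (i + 1)
    else result

def solve (N : Int) (K : Int) (A : List Int) : Int :=
  solveLoop K A K.toNat 0 (List.replicate N.toNat (-1)) [] 0 + 1

-- ===== PORT B =====
-- LOG = 1; while (1 << LOG) <= K: LOG += 1
def logLoop (K : Int) : Nat → Nat → Nat
  | 0, L => L
  | f + 1, L => if (2 : Int) ^ L ≤ K then logLoop K f (L + 1) else L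

-- [prev[prev[v]] for v in range(N)]
def upLevel (N : Int) (prev : List Int) : List Int :=
  (PySem.List.pyRange 0 N 1).map
    (fun v => PySem.List.pyGetD prev (PySem.List.pyGetD prev v 0) 0)

-- for _ in range(1, LOG): prev = up[-1]; up.append([...]) — r counts the remaining appends
def buildUp (N : Int) : Nat → List (List Int) → List (List Int)
  | 0, up => up
  | r + 1, up => buildUp N r (up ++ [upLevel N (PySem.List.pyGetD up (-1) [])])

def solve_alt (N : Int) (K : Int) (A : List Int) : Int :=
  if K ≤ 0 then 1
  else
    let LOG := logLoop K K.toNat 1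
    let up := buildUp N (LOG - 1)
      [(PySem.List.pyRange 0 N 1).map (fun v => PySem.List.pyGetD A v 0 - 1)]
    (List.range LOG).foldl
      (fun (cur : Int) (j : Nat) =>
        if PySem.Int.band (K >>> j) 1 = 1 then
          PySem.List.pyGetD (PySem.List.pyGetD up (j : Int) []) cur 0
        else cur) 0
      + 1

-- ===== PRECONDITION & SPEC =====
-- Pre_ admits every K ≤ 0 (A's loop never runs), every K = 1 with 1 ≤ N ≤ len(A) (one plain
-- step, no table composition), and otherwise the problem's natural domain: 1 ≤ N ≤ len(A) with
-- every successor entry A[v] in 1..N.  It excludes K ≥ 2 inputs with out-of-range entries,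
-- where A raises IndexError or returns via Python's negative-index wraparound an out-of-range
-- node label, and B (which tables ALL N nodes) raises or differs.
def Pre_solve (N : Int) (K : Int) (A : List Int) : Prop :=
  K ≤ 0 ∨ (K = 1 ∧ 1 ≤ N ∧ N ≤ (A.length : Int))
    ∨ (1 ≤ N ∧ N ≤ (A.length : Int) ∧ ∀ x ∈ A.take N.toNat, 1 ≤ x ∧ x ≤ N)
instance (N : Int) (K : Int) (A : List Int) : Decidable (Pre_solve N K A) := by
  unfold Pre_solve; infer_instance

def pvWitness_solve : Int × Int × List Int := (3, 5, [2, 3, 1])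

def Spec_solve (N : Int) (K : Int) (A : List Int) (out : Int) : Prop := out = solve_alt N K A
instance (N : Int) (K : Int) (A : List Int) (out : Int) : Decidable (Spec_solve N K A out) := by
  unfold Spec_solve; infer_instance

-- ===== CLAIM (what is proved, stated in full; the proofs are below) =====
def Claim_equal_solve : Prop := ∀ (N : Int) (K : Int) (A : List Int),
  Dom_solve N K A → Pre_solve N K A → Spec_solve N K A (solve N K A)

-- ===== LEMMAS AND PROOFS =====

-- the step function both programs follow, and the true K-step orbit from node 0
def gstep (A : List Int) (v : Int) : Int := PySem.List.pyGetD A v 0 - 1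
def path (A : List Int) (t : Nat) : Int := (gstep A)^[t] 0

lemma gstep_range {N : Int} {A : List Int} (hlen : N ≤ (A.length : Int))
    (hA : ∀ x ∈ A.take N.toNat, 1 ≤ x ∧ x ≤ N) {v : Int} (h0 : 0 ≤ v) (h1 : v < N) :
    0 ≤ gstep A v ∧ gstep A v < N := by
  unfold gstep
  rw [PySem.List.pyGetD_eq_getElem A 0 h0 (by omega)]
  have hvn : v.toNat < N.toNat := by omega
  have hvl : v.toNat < A.length := by omega
  have hmem : A[v.toNat] ∈ A.take N.toNat := by
    have hlt : v.toNat < (A.take N.toNat).length := by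
      simp [List.length_take]; omega
    have hg : (A.take N.toNat)[v.toNat] = A[v.toNat] := List.getElem_take
    rw [← hg]
    exact List.getElem_mem hlt
  have := hA _ hmem
  omega

lemma iter_range {N : Int} {A : List Int} (hlen : N ≤ (A.length : Int))
    (hA : ∀ x ∈ A.take N.toNat, 1 ≤ x ∧ x ≤ N) (n : Nat) {v : Int} (h0 : 0 ≤ v) (h1 : v < N) :
    0 ≤ (gstep A)^[n] v ∧ (gstep A)^[n] v < N := by
  induction n with
  | zero => simpa using ⟨h0, h1⟩
  | succ n ih =>
    rw [Function.iterate_succ_apply']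
    exact gstep_range hlen hA ih.1 ih.2

lemma path_range {N : Int} {A : List Int} (hN : 1 ≤ N) (hlen : N ≤ (A.length : Int))
    (hA : ∀ x ∈ A.take N.toNat, 1 ≤ x ∧ x ≤ N) (t : Nat) :
    0 ≤ path A t ∧ path A t < N := by
  exact iter_range hlen hA t le_rfl (by omega)

lemma path_period {A : List Int} {c L : Nat} (hL : path A (c + L) = path A c) :
    ∀ d q : Nat, path A (c + d + q * L) = path A (c + d) := by
  simp only [path] at hL
  have base : ∀ a : Nat, path A (c + a + L) = path A (c + a) := by
    intro a
    have e1 : c + a + L = a + (c + L) := by omega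
    simp only [path]
    rw [e1, Function.iterate_add_apply, hL, ← Function.iterate_add_apply, Nat.add_comm a c]
  intro d q
  induction q with
  | zero => simp
  | succ q ih =>
    have e : c + d + (q + 1) * L = c + (d + q * L) + L := by ring
    rw [e, base (d + q * L)]
    have e2 : c + (d + q * L) = c + d + q * L := by omega
    rw [e2, ih]

lemma solveLoop_eq {N K : Int} {A : List Int} (hN : 1 ≤ N) (hlen : N ≤ (A.length : Int))
    (hA : ∀ x ∈ A.take N.toNat, 1 ≤ x ∧ x ≤ N) :
    ∀ (fuel t : Nat) (cs : List Int), fuel = K.toNat - t → t ≤ K.toNat →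
      cs.length = N.toNat →
      (∀ (v : Nat) (hv : v < cs.length),
        cs[v] = -1 ∨ (∃ c : Nat, c < t ∧ cs[v] = (c : Int) ∧ path A c = (v : Int))) →
      solveLoop K A fuel (path A t) cs ((List.range t).map (path A)) (t : Int) = path A K.toNat := by
  intro fuel
  induction fuel with
  | zero =>
    intro t cs hf ht hlencs hinv
    have : t = K.toNat := by omega
    rw [this]
    rfl
  | succ fuel ih =>
    intro t cs hf ht hlencs hinv
    have htK : (t : Int) < K := by omega
    have hres := path_range hN hlen hA t
    have hvcs : (path A t).toNat < cs.length := by omega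
    have hcsg : PySem.List.pyGetD cs (path A t) (-1) = cs[(path A t).toNat] :=
      PySem.List.pyGetD_eq_getElem _ _ hres.1 (by omega)
    by_cases hc : cs[(path A t).toNat]'hvcs = -1
    · -- unvisited: take one more step
      have hstep : PySem.List.pyGetD A (path A t) 0 - 1 = path A (t + 1) := by
        simp only [path]
        rw [Function.iterate_succ_apply']
        rfl
      have hset : PySem.List.pySetD cs (path A t) (t : Int)
          = cs.set (path A t).toNat (t : Int) := PySem.List.pySetD_of_nonneg _ _ hres.1
      have hrs : (List.range t).map (path A) ++ [path A t] = (List.range (t + 1)).map (path A) := by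
        rw [List.range_succ, List.map_append]
        rfl
      have hi : (t : Int) + 1 = ((t + 1 : Nat) : Int) := by push_cast; ring
      show (if (t : Int) < K then _ else _) = _
      rw [if_pos htK, if_neg (by rw [hcsg]; simpa using hc), hstep, hset, hrs, hi]
      apply ih (t + 1) _ (by omega) (by omega) (by rw [List.length_set]; exact hlencs)
      intro v hv
      rw [List.length_set] at hv
      by_cases hveq : v = (path A t).toNat
      · right
        refine ⟨t, by omega, ?_, ?_⟩
        · rw [List.getElem_set, if_pos hveq.symm]
        · rw [hveq]
          omega
      · rw [List.getElem_set, if_neg (fun h => hveq h.symm)]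
        rcases hinv v hv with h | ⟨c, hct, hcv, hpc⟩
        · exact Or.inl h
        · exact Or.inr ⟨c, by omega, hcv, hpc⟩
    · -- revisited: A breaks out via the recorded cycle
      rcases hinv (path A t).toNat hvcs with h | ⟨c, hct, hcv, hpc⟩
      · exact absurd h hc
      show (if (t : Int) < K then _ else _) = _
      rw [if_pos htK, if_pos (by rw [hcsg, hcv]; intro h; omega), hcsg, hcv]
      show PySem.List.pyGetD (List.map (path A) (List.range t))
          (-((t : Int) - (c : Int)) + (K - ((t : Int) + PySem.Int.floordiv (K - (t : Int)) ((t : Int) - (c : Int)) * ((t : Int) - (c : Int))))) 0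
        = path A K.toNat
      obtain ⟨q, hq⟩ : ∃ q' : Int, PySem.Int.floordiv (K - (t : Int)) ((t : Int) - (c : Int)) = q' := ⟨_, rfl⟩
      rw [hq]
      obtain ⟨m, hm⟩ : ∃ m' : Int, K - ((t : Int) + q * ((t : Int) - (c : Int))) = m' := ⟨_, rfl⟩
      rw [hm]
      have hlpos : (0 : Int) < (t : Int) - (c : Int) := by omega
      have hmmod : m = PySem.Int.mod (K - (t : Int)) ((t : Int) - (c : Int)) := by
        have hfm := PySem.Int.floordiv_mul_add_mod (K - (t : Int)) ((t : Int) - (c : Int))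
        rw [hq] at hfm
        omega
      have hm0 : 0 ≤ m := by rw [hmmod]; exact PySem.Int.mod_nonneg _ hlpos
      have hml : m < (t : Int) - (c : Int) := by rw [hmmod]; exact PySem.Int.mod_lt _ hlpos
      have hq0 : 0 ≤ q := by
        rw [← hq, PySem.Int.floordiv_eq_ediv_of_pos hlpos]
        exact Int.ediv_nonneg (show (0:Int) ≤ K - (t:Int) by omega) (by omega)
      obtain ⟨mo, hmo⟩ : ∃ mo : Nat, (mo : Int) = m := ⟨m.toNat, by omega⟩
      obtain ⟨P, hP⟩ : ∃ P' : Nat, P' = (t - c) - mo := ⟨_, rfl⟩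
      have hP0 : 0 < P := by omega
      have hPlen : P ≤ ((List.range t).map (path A)).length := by simp; omega
      have hidx : -((t : Int) - (c : Int)) + m = -((P : Nat) : Int) := by omega
      rw [hidx, PySem.List.pyGetD_neg_natCast _ _ _ hP0 hPlen]
      have hlen' : ((List.range t).map (path A)).length = t := by simp
      have hgete : ((List.range t).map (path A))[((List.range t).map (path A)).length - P]'(by omega)
          = path A (c + mo) := by
        simp only [hlen', List.getElem_map, List.getElem_range]
        congr 1
        omega
      rw [hgete]
      obtain ⟨Q, hQ⟩ : ∃ Q' : Nat, (Q' : Int) = q + 1 := ⟨(q + 1).toNat, by omega⟩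
      obtain ⟨QL, hQL⟩ : ∃ QL' : Nat, QL' = Q * (t - c) := ⟨_, rfl⟩
      have hKnat : K.toNat = c + mo + QL := by
        have h1 : ((QL : Nat) : Int) = (Q : Int) * ((t : Int) - (c : Int)) := by
          rw [hQL, Nat.cast_mul, Nat.cast_sub (le_of_lt hct)]
        have h2 : K = (c : Int) + m + ((QL : Nat) : Int) := by
          rw [h1, hQ, ← hm]
          ring
        omega
      have hper : path A (c + (t - c)) = path A c := by
        have he : c + (t - c) = t := by omega
        rw [he, hpc]
        omega
      rw [hKnat, hQL, path_period hper mo Q]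

lemma solve_eq_path {N K : Int} {A : List Int} (hN : 1 ≤ N) (hlen : N ≤ (A.length : Int))
    (hA : ∀ x ∈ A.take N.toNat, 1 ≤ x ∧ x ≤ N) :
    solve N K A = path A K.toNat + 1 := by
  unfold solve
  have h := solveLoop_eq (N := N) (K := K) (A := A) hN hlen hA K.toNat 0 (List.replicate N.toNat (-1))
    (by omega) (by omega) (by simp)
    (by intro v hv; left; exact List.getElem_replicate ..)
  simpa [path] using h

lemma logLoop_le (K : Int) (f L : Nat) : L ≤ logLoop K f L := by
  induction f generalizing L with
  | zero => simp [logLoop]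
  | succ f ih =>
    simp only [logLoop]
    split
    · exact le_trans (by omega) (ih (L + 1))
    · omega

lemma logLoop_gt (K : Int) (f L : Nat) (h : K < (L : Int) + (f : Int)) :
    K < 2 ^ logLoop K f L := by
  induction f generalizing L with
  | zero =>
    have h2 : (L : Int) ≤ (2 : Int) ^ L := by
      have := Nat.lt_two_pow_self (n := L)
      have h3 : (L : Int) < ((2 : Nat) ^ L : Nat) := by exact_mod_cast this
      push_cast at h3 ⊢
      omega
    simp only [logLoop]
    omega
  | succ f ih =>
    simp only [logLoop]
    split
    · exact ih (L + 1) (by push_cast at h ⊢; omega)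
    · omega

-- the j-th level of the doubling table
def level (N : Int) (A : List Int) (j : Nat) : List Int :=
  (PySem.List.pyRange 0 N 1).map (fun v => (gstep A)^[2 ^ j] v)

lemma upLevel_level {N : Int} {A : List Int} (hlen : N ≤ (A.length : Int))
    (hA : ∀ x ∈ A.take N.toNat, 1 ≤ x ∧ x ≤ N) (j : Nat) :
    upLevel N (level N A j) = level N A (j + 1) := by
  unfold upLevel level
  apply List.map_congr_left
  intro v hv
  rw [PySem.List.mem_pyRange_one] at hv
  have hin := iter_range hlen hA (2 ^ j) hv.1 hv.2
  rw [PySem.List.pyGetD_map_pyRange_of_nonneg _ _ _ _ hv.1 hv.2,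
      PySem.List.pyGetD_map_pyRange_of_nonneg _ _ _ _ hin.1 hin.2,
      ← Function.iterate_add_apply]
  congr 1
  rw [pow_succ]
  ring

lemma buildUp_levels {N : Int} {A : List Int} (hlen : N ≤ (A.length : Int))
    (hA : ∀ x ∈ A.take N.toNat, 1 ≤ x ∧ x ≤ N) :
    ∀ (r s : Nat), 1 ≤ s →
      buildUp N r ((List.range s).map (level N A)) = (List.range (s + r)).map (level N A) := by
  intro r
  induction r with
  | zero => intro s _; rfl
  | succ r ih =>
    intro s hs
    obtain ⟨s', rfl⟩ : ∃ s', s = s' + 1 := ⟨s - 1, by omega⟩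
    show buildUp N r _ = _
    have h1 : (List.range (s' + 1)).map (level N A)
        = (List.range s').map (level N A) ++ [level N A s'] := by
      rw [List.range_succ, List.map_append]; rfl
    have h2 : PySem.List.pyGetD ((List.range (s' + 1)).map (level N A)) (-1) []
        = level N A s' := by
      rw [h1]
      exact PySem.List.pyGetD_neg_one_append_singleton ..
    rw [h2, upLevel_level hlen hA]
    have h3 : (List.range (s' + 1)).map (level N A) ++ [level N A (s' + 1)]
        = (List.range (s' + 2)).map (level N A) := by
      rw [List.range_succ (n := s' + 1), List.map_append]; rfl
    rw [h3]
    have h4 := ih (s' + 2) (by omega)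
    have e : s' + 1 + (r + 1) = s' + 2 + r := by omega
    rw [← e] at h4
    exact h4

lemma bitFold_eq {N K : Int} {A : List Int} (hN : 1 ≤ N) (hlen : N ≤ (A.length : Int))
    (hA : ∀ x ∈ A.take N.toNat, 1 ≤ x ∧ x ≤ N) (hK : 0 < K) (LOG : Nat) :
    ∀ J : Nat, J ≤ LOG →
      (List.range J).foldl
        (fun (cur : Int) (j : Nat) =>
          if PySem.Int.band (K >>> j) 1 = 1 then
            PySem.List.pyGetD (PySem.List.pyGetD ((List.range LOG).map (level N A)) (j : Int) []) cur 0
          else cur) 0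
      = path A (K.toNat % 2 ^ J) := by
  intro J
  induction J with
  | zero => intro _; simp [path, Nat.mod_one]
  | succ J ihJ =>
    intro hJ
    rw [List.range_succ, List.foldl_append, ihJ (by omega)]
    simp only [List.foldl_cons, List.foldl_nil]
    have hsh : K >>> J = ((K.toNat >>> J : Nat) : Int) := by
      have e : K = ((K.toNat : Nat) : Int) := by omega
      rw [e]
      exact Int.mem_toNat?.mp rfl
    have hband : PySem.Int.band (K >>> J) 1 = ((K.toNat >>> J &&& 1 : Nat) : Int) := by
      rw [hsh]
      exact_mod_cast PySem.Int.band_natCast (K.toNat >>> J) 1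
    have hbit : (PySem.Int.band (K >>> J) 1 = 1) ↔ (K.toNat / 2 ^ J % 2 = 1) := by
      rw [hband, Nat.shiftRight_eq_div_pow, Nat.and_one_is_mod _]
      constructor
      · intro h; exact_mod_cast h
      · intro h; exact_mod_cast congrArg (Nat.cast : Nat → Int) h
    have htbl : PySem.List.pyGetD ((List.range LOG).map (level N A)) ((J : Nat) : Int) []
        = level N A J := by
      rw [PySem.List.pyGetD_natCast]
      rw [List.getD_eq_getElem?_getD]
      rw [List.getElem?_map]
      simp [List.getElem?_range (by omega : J < LOG)]
    have hcur := path_range hN hlen hA (K.toNat % 2 ^ J)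
    have hmp : ∀ r : Nat, path A (2 ^ J + r) = (gstep A)^[2 ^ J] (path A r) := by
      intro r
      rw [path, path, Function.iterate_add_apply]
    have hsp : K.toNat % 2 ^ (J + 1) = K.toNat % 2 ^ J + 2 ^ J * (K.toNat / 2 ^ J % 2) :=
      Nat.mod_pow_succ
    by_cases hb : K.toNat / 2 ^ J % 2 = 1
    · have harith : 2 ^ J + K.toNat % 2 ^ J = K.toNat % 2 ^ (J + 1) := by
        rw [hsp, hb]
        omega
      rw [if_pos (hbit.mpr hb), htbl]
      rw [level, PySem.List.pyGetD_map_pyRange_of_nonneg _ _ _ _ hcur.1 hcur.2]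
      rw [← hmp, harith]
    · have hb0 : K.toNat / 2 ^ J % 2 = 0 := by omega
      have harith : K.toNat % 2 ^ (J + 1) = K.toNat % 2 ^ J := by
        rw [hsp, hb0]
        omega
      rw [if_neg (fun h => hb (hbit.mp h)), harith]

lemma solve_alt_eq_path {N K : Int} {A : List Int} (hN : 1 ≤ N) (hlen : N ≤ (A.length : Int))
    (hA : ∀ x ∈ A.take N.toNat, 1 ≤ x ∧ x ≤ N) (hK : 0 < K) :
    solve_alt N K A = path A K.toNat + 1 := by
  unfold solve_alt
  rw [if_neg (by omega)]
  show (List.range (logLoop K K.toNat 1)).foldl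
      (fun (cur : Int) (j : Nat) =>
        if PySem.Int.band (K >>> j) 1 = 1 then
          PySem.List.pyGetD (PySem.List.pyGetD
            (buildUp N (logLoop K K.toNat 1 - 1)
              [(PySem.List.pyRange 0 N 1).map (fun v => PySem.List.pyGetD A v 0 - 1)]) (j : Int) []) cur 0
        else cur) 0 + 1 = path A K.toNat + 1
  have hup0 : [(PySem.List.pyRange 0 N 1).map (fun v => PySem.List.pyGetD A v 0 - 1)]
      = (List.range 1).map (level N A) := by
    simp [level, gstep]
  rw [hup0, buildUp_levels hlen hA _ 1 le_rfl]
  have hLOG1 : 1 ≤ logLoop K K.toNat 1 := logLoop_le K K.toNat 1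
  have h1r : 1 + (logLoop K K.toNat 1 - 1) = logLoop K K.toNat 1 := by omega
  rw [h1r]
  rw [bitFold_eq hN hlen hA hK (logLoop K K.toNat 1) (logLoop K K.toNat 1) le_rfl]
  have hKlt : K < 2 ^ logLoop K K.toNat 1 := logLoop_gt K K.toNat 1 (by omega)
  have hklt : K.toNat < 2 ^ logLoop K K.toNat 1 := by
    have : ((2 ^ logLoop K K.toNat 1 : Nat) : Int) = (2 : Int) ^ logLoop K K.toNat 1 := by
      push_cast; ring
    omega
  rw [Nat.mod_eq_of_lt hklt]

lemma solve_one {N : Int} {A : List Int} (hN : 1 ≤ N) :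
    solve N 1 A = PySem.List.pyGetD A 0 0 - 1 + 1 := by
  have hcs : PySem.List.pyGetD (List.replicate N.toNat (-1 : Int)) 0 (-1) = -1 := by
    rw [PySem.List.pyGetD_eq_getElem _ _ le_rfl (by simp; omega)]
    simp
  unfold solve
  show (if (0 : Int) < 1 then
      if PySem.List.pyGetD (List.replicate N.toNat (-1 : Int)) 0 (-1) ≠ -1 then _ else
        solveLoop 1 A 0 (PySem.List.pyGetD A 0 0 - 1) _ _ _
    else _) + 1 = _
  rw [if_pos (by norm_num), if_neg (by rw [hcs]; simp)]
  rfl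

lemma solve_alt_one {N : Int} {A : List Int} (hN : 1 ≤ N) :
    solve_alt N 1 A = PySem.List.pyGetD A 0 0 - 1 + 1 := by
  unfold solve_alt
  rw [if_neg (by norm_num)]
  show (List.range (logLoop 1 (1 : Int).toNat 1)).foldl
      (fun (cur : Int) (j : Nat) =>
        if PySem.Int.band ((1 : Int) >>> j) 1 = 1 then
          PySem.List.pyGetD (PySem.List.pyGetD
            (buildUp N (logLoop 1 (1 : Int).toNat 1 - 1)
              [(PySem.List.pyRange 0 N 1).map (fun v => PySem.List.pyGetD A v 0 - 1)]) (j : Int) []) cur 0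
        else cur) 0 + 1 = _
  have h1 : logLoop 1 (1 : Int).toNat 1 = 1 := rfl
  rw [h1]
  simp only [List.range_one, List.foldl_cons, List.foldl_nil, buildUp,
    Nat.cast_zero]
  rw [if_pos (by decide), PySem.List.pyGetD_zero_cons,
    PySem.List.pyGetD_map_pyRange_of_nonneg _ _ _ _ le_rfl (by omega)]

-- ===== VERDICT (by name: the statement is the Claim_ definition above) =====
theorem solve_spec : Claim_equal_solve := by
  intro N K A _ hpre
  unfold Spec_solve
  rcases hpre with hK | ⟨hK1, hN, hlen⟩ | ⟨hN, hlen, hA⟩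
  · have h1 : solve N K A = 1 := by
      unfold solve
      have h0 : K.toNat = 0 := by omega
      rw [h0]
      rfl
    have h2 : solve_alt N K A = 1 := by unfold solve_alt; rw [if_pos hK]
    rw [h1, h2]
  · rw [hK1, solve_one hN, solve_alt_one hN]
  · by_cases hK : K ≤ 0
    · have h1 : solve N K A = 1 := by
        unfold solve
        have h0 : K.toNat = 0 := by omega
        rw [h0]
        rfl
      have h2 : solve_alt N K A = 1 := by unfold solve_alt; rw [if_pos hK]
      rw [h1, h2]
    · rw [solve_eq_path hN hlen hA, solve_alt_eq_path hN hlen hA (by omega)]
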